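-- pv_equiv track=rewrite | github.com/B612-Asteroid-Institute/adam_core | src/adam_core/photometry/tests/test_lsst_magnitude_fixture.py | _format_residual_table
-- ===== SOURCE A (Python) =====
-- def _format_residual_table(rows: list[dict[str, object]]) -> str:
--     cols = [
--         "filter_id",
--         "n",
--         "phase_deg_span",
--         "slope_resid(mag/deg)",
--         "pearson_r(resid,phase)",
--         "median_abs",
--         "p95_abs",
--         "mean",
--         "std",
--         "min",
--         "max",
--         "baseline_median_abs",
--         "baseline_p95_abs",
--     ]
--     widths: dict[str, int] = {c: len(c) for c in cols}
--     for r in rows: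
--         for c in cols:
--             widths[c] = max(widths[c], len(str(r.get(c, ""))))
--
--     def fmt_row(r: dict[str, object]) -> str:
--         parts = [str(r.get(c, "")).rjust(widths[c]) for c in cols]
--         return "  ".join(parts)
--
--     header = "  ".join([c.rjust(widths[c]) for c in cols])
--     sep = "  ".join(["-" * widths[c] for c in cols])
--     body = "\n".join(fmt_row(r) for r in rows)
--     return "\n".join([header, sep, body])
-- ===== SOURCE B (Python) =====
-- def _format_residual_table(rows: list[dict[str, object]]) -> str:
--     cols = [
--         "filter_id",
--         "n",
--         "phase_deg_span",
--         "slope_resid(mag/deg)",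
--         "pearson_r(resid,phase)",
--         "median_abs",
--         "p95_abs",
--         "mean",
--         "std",
--         "min",
--         "max",
--         "baseline_median_abs",
--         "baseline_p95_abs",
--     ]
--     # column-major assembly: each column independently yields its full padded
--     # line-fragment list (header, dashes, cells); columns are then zipped together
--     lines = None
--     for c in cols:
--         cells = [str(r.get(c, "")) for r in rows]
--         w = max(len(s) for s in [c] + cells)
--         col_lines = [c.rjust(w), "-" * w] + [s.rjust(w) for s in cells]
--         lines = col_lines if lines is None else [a + "  " + b for a, b in zip(lines, col_lines)]
--     header, sep, *body = lines
--     return header + "\n" + sep + "\n" + "\n".join(body)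
-- ===== Notes on version B (the rewrite author's own statement) =====
-- stated objective: alternative
-- what changed: B builds the table column-major: for each column it independently computes its width and emits the column's full padded line fragments (header cell, dashes, data cells), then zips the columns' fragment lists together with ' ' and joins the resulting lines, instead of A's row-major rendering driven by a global width dict.
import Mathlib
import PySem

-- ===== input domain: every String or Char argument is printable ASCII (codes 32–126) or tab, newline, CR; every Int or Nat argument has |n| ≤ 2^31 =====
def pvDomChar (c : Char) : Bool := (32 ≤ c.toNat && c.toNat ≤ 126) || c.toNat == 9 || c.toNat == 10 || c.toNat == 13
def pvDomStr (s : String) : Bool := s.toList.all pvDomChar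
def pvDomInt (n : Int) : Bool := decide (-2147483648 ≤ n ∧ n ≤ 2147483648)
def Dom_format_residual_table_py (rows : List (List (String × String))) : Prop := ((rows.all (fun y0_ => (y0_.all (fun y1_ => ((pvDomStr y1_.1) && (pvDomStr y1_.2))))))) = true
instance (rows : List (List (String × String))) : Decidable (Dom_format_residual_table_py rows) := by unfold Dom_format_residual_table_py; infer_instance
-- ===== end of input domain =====

-- B assembles the table column-major: each column independently yields its padded
-- line fragments (header, dashes, cells) and the columns are zipped together;
-- no width table is kept at all (different decomposition, same cost).

-- shared transliteration helpers: the fixed column list, r.get(c, "") on an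
-- association-list dict (first match), and str.rjust(w) on List Char
def pvCols : List String :=
  ["filter_id", "n", "phase_deg_span", "slope_resid(mag/deg)", "pearson_r(resid,phase)",
   "median_abs", "p95_abs", "mean", "std", "min", "max",
   "baseline_median_abs", "baseline_p95_abs"]

def pvGet (r : List (String × String)) (c : String) : String :=
  ((r.find? (fun p => p.1 == c)).map (·.2)).getD ""

def pvRjustC (s : List Char) (w : Int) : List Char :=
  List.replicate (w - (s.length : Int)).toNat ' ' ++ s

-- ===== PORT A =====
-- A's width dict: seeded with the column-name lengths, then the two nested loops of maxima
def pvWidthsA (rows : List (List (String × String))) : PySem.Dict String Int :=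
  rows.foldl (fun d r =>
    pvCols.foldl (fun d c =>
      d.insert c (max (d.getD c 0) (PySem.Str.len (pvGet r c)))) d)
    (PySem.Dict.ofList (pvCols.map (fun c => (c, PySem.Str.len c))))

def format_residual_table_py (rows : List (List (String × String))) : String :=
  let widths := pvWidthsA rows
  let fmtRow : List (String × String) → List Char := fun r =>
    PySem.Chars.join "  ".toList
      (pvCols.map (fun c => pvRjustC (pvGet r c).toList (widths.getD c 0)))
  let header := PySem.Chars.join "  ".toList
    (pvCols.map (fun c => pvRjustC c.toList (widths.getD c 0)))
  let sep := PySem.Chars.join "  ".toList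
    (pvCols.map (fun c => List.replicate (widths.getD c 0).toNat '-'))
  let body := PySem.Chars.join "\n".toList (rows.map fmtRow)
  String.ofList (PySem.Chars.join "\n".toList [header, sep, body])

-- ===== PORT B =====
-- one column of B's table: its padded header, its dashes, its padded cells
def pvColLinesB (rows : List (List (String × String))) (c : String) : List (List Char) :=
  let cells := rows.map (fun r => pvGet r c)
  let w := cells.foldl (fun m s => max m (PySem.Str.len s)) (PySem.Str.len c)
  pvRjustC c.toList w :: List.replicate w.toNat '-' :: cells.map (fun s => pvRjustC s.toList w)

def format_residual_table_py_alt (rows : List (List (String × String))) : String :=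
  let lines : Option (List (List Char)) :=
    pvCols.foldl (fun acc c =>
      match acc with
      | none => some (pvColLinesB rows c)
      | some ls => some (List.zipWith (fun a b => a ++ "  ".toList ++ b) ls (pvColLinesB rows c))) none
  match lines with
  | some (header :: sep :: body) =>
      String.ofList (header ++ "\n".toList ++ sep ++ "\n".toList ++ PySem.Chars.join "\n".toList body)
  | _ => ""   -- unreachable: pvCols is nonempty, so lines holds at least two entries

-- ===== PRECONDITION & SPEC =====
def Spec_format_residual_table_py (rows : List (List (String × String))) (out : String) : Prop := out = format_residual_table_py_alt rows
instance (rows : List (List (String × String))) (out : String) : Decidable (Spec_format_residual_table_py rows out) := by unfold Spec_format_residual_table_py; infer_instance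

-- ===== CLAIM (what is proved, stated in full; the proofs are below) =====
def Claim_equal_format_residual_table_py : Prop := ∀ (rows : List (List (String × String))), Dom_format_residual_table_py rows → Spec_format_residual_table_py rows (format_residual_table_py rows)

-- ===== LEMMAS AND PROOFS =====

-- the width both programs give to column c
def pvW (rows : List (List (String × String))) (c : String) : Int :=
  rows.foldl (fun m r => max m (PySem.Str.len (pvGet r c))) (PySem.Str.len c)

def pvColsTail : List String :=
  ["n", "phase_deg_span", "slope_resid(mag/deg)", "pearson_r(resid,phase)",
   "median_abs", "p95_abs", "mean", "std", "min", "max",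
   "baseline_median_abs", "baseline_p95_abs"]

-- zipWith of two maps over the same list collapses to a single map
theorem pv_zipWith_maps {α β γ δ : Type} (f : β → γ → δ) (g : α → β) (h : α → γ)
    (l : List α) : List.zipWith f (l.map g) (l.map h) = l.map (fun x => f (g x) (h x)) := by
  induction l with
  | nil => rfl
  | cons a t ih => simp [ih]

-- one inner pass of A (the fold of inserts over a nodup key list) read back at key c
theorem pv_inner_getD (g : String → Int) (cs : List String) (hnd : cs.Nodup)
    (d : PySem.Dict String Int) (c : String) :
    (cs.foldl (fun d c' => d.insert c' (max (d.getD c' 0) (g c'))) d).getD c 0 =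
      if c ∈ cs then max (d.getD c 0) (g c) else d.getD c 0 := by
  induction cs generalizing d with
  | nil => simp
  | cons a t ih =>
    rcases List.nodup_cons.mp hnd with ⟨ha, hnt⟩
    simp only [List.foldl_cons, ih hnt]
    by_cases hca : c = a
    · subst hca
      simp [ha]
    · simp [PySem.Dict.getD_insert, hca, List.mem_cons]

-- A's outer width loop read back at a column c, for any seed dict
theorem pv_widths_fold_getD (rows : List (List (String × String))) (d : PySem.Dict String Int)
    (c : String) (hc : c ∈ pvCols) :
    (rows.foldl (fun d r =>
      pvCols.foldl (fun d c' =>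
        d.insert c' (max (d.getD c' 0) (PySem.Str.len (pvGet r c')))) d) d).getD c 0 =
    rows.foldl (fun m r => max m (PySem.Str.len (pvGet r c))) (d.getD c 0) := by
  induction rows generalizing d with
  | nil => rfl
  | cons r rs ih =>
    simp only [List.foldl_cons]
    rw [ih]
    rw [pv_inner_getD (fun c' => PySem.Str.len (pvGet r c')) pvCols (by decide) d c, if_pos hc]

theorem pv_widths0_getD : ∀ c ∈ pvCols,
    (PySem.Dict.ofList (pvCols.map (fun c => (c, PySem.Str.len c)))).getD c 0 = PySem.Str.len c := by
  decide

theorem pv_widthsA_getD (rows : List (List (String × String))) (c : String) (hc : c ∈ pvCols) :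
    (pvWidthsA rows).getD c 0 = pvW rows c := by
  unfold pvWidthsA pvW
  rw [pv_widths_fold_getD rows _ c hc, pv_widths0_getD c hc]

-- prepending distributes through the join fold
theorem pv_foldl_append_pull (sep u y : List Char) (ys : List (List Char)) :
    u ++ ys.foldl (fun a b => a ++ sep ++ b) y = ys.foldl (fun a b => a ++ sep ++ b) (u ++ y) := by
  induction ys generalizing y with
  | nil => rfl
  | cons z zs ih => simp only [List.foldl_cons, ← List.append_assoc, ih]

-- a nonempty join is the fold of "a ++ sep ++ b"
theorem pv_join_foldl (sep : List Char) (x : List Char) (xs : List (List Char)) :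
    PySem.Chars.join sep (x :: xs) = xs.foldl (fun a b => a ++ sep ++ b) x := by
  induction xs generalizing x with
  | nil => simp [PySem.Chars.join_singleton]
  | cons y ys ih =>
    rw [PySem.Chars.join_cons_cons, ih, pv_foldl_append_pull, List.foldl_cons]

theorem pv_join_map {α : Type} (sep : List Char) (f : α → List Char) (c : α) (cs : List α) :
    PySem.Chars.join sep ((c :: cs).map f) = cs.foldl (fun a x => a ++ sep ++ f x) (f c) := by
  rw [List.map_cons, pv_join_foldl, List.foldl_map]

theorem pv_join3 (nl h s b : List Char) :
    PySem.Chars.join nl [h, s, b] = h ++ nl ++ s ++ nl ++ b := by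
  rw [PySem.Chars.join_cons_cons, PySem.Chars.join_cons_cons, PySem.Chars.join_singleton]
  simp [List.append_assoc]

-- lifting 'some' through B's column fold
theorem pv_fold_some {α : Type} (L : α → List (List Char)) (cs : List α)
    (init : List (List Char)) :
    cs.foldl (fun acc c =>
      match acc with
      | none => some (L c)
      | some ls => some (List.zipWith (fun a b => a ++ "  ".toList ++ b) ls (L c))) (some init)
    = some (cs.foldl (fun ls c => List.zipWith (fun a b => a ++ "  ".toList ++ b) ls (L c)) init) := by
  induction cs generalizing init with
  | nil => rfl
  | cons c cs ih =>
    simp only [List.foldl_cons]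
    exact ih _

-- the shape of B's zip-fold: header, separator and body rows evolve independently
theorem pv_fold_shape {α : Type} (hd dash : α → List Char)
    (cell : α → List (String × String) → List Char)
    (rows : List (List (String × String))) (cs : List α)
    (H S : List Char) (F : List (String × String) → List Char) :
    cs.foldl (fun ls c =>
        List.zipWith (fun a b => a ++ "  ".toList ++ b) ls
          (hd c :: dash c :: rows.map (cell c))) (H :: S :: rows.map F)
    = cs.foldl (fun a c => a ++ "  ".toList ++ hd c) H ::
      cs.foldl (fun a c => a ++ "  ".toList ++ dash c) S ::
      rows.map (fun r => cs.foldl (fun a c => a ++ "  ".toList ++ cell c r) (F r)) := by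
  induction cs generalizing H S F with
  | nil => rfl
  | cons c cs ih =>
    simp only [List.foldl_cons, List.zipWith_cons_cons]
    rw [pv_zipWith_maps]
    exact ih (H ++ "  ".toList ++ hd c) (S ++ "  ".toList ++ dash c)
      (fun r => F r ++ "  ".toList ++ cell c r)

-- B's column line fragments, with the width written as pvW
theorem pv_colLinesB_eq (rows : List (List (String × String))) (c : String) :
    pvColLinesB rows c =
      pvRjustC c.toList (pvW rows c) :: List.replicate (pvW rows c).toNat '-' ::
        rows.map (fun r => pvRjustC (pvGet r c).toList (pvW rows c)) := by
  unfold pvColLinesB pvW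
  simp only [List.foldl_map, List.map_map]
  rfl

-- both programs written in the same canonical character form
theorem pv_A_char (rows : List (List (String × String))) :
    format_residual_table_py rows = String.ofList (
      PySem.Chars.join "  ".toList (pvCols.map (fun c => pvRjustC c.toList (pvW rows c)))
      ++ "\n".toList ++
      PySem.Chars.join "  ".toList (pvCols.map (fun c => List.replicate (pvW rows c).toNat '-'))
      ++ "\n".toList ++
      PySem.Chars.join "\n".toList (rows.map (fun r =>
        PySem.Chars.join "  ".toList
          (pvCols.map (fun c => pvRjustC (pvGet r c).toList (pvW rows c)))))) := by
  unfold format_residual_table_py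
  simp only [pv_join3]
  rw [List.map_congr_left (fun c hc => congrArg (pvRjustC c.toList) (pv_widthsA_getD rows c hc)),
    List.map_congr_left
      (fun c hc => congrArg (fun w : Int => List.replicate w.toNat '-') (pv_widthsA_getD rows c hc)),
    List.map_congr_left (fun r _ => congrArg (PySem.Chars.join "  ".toList)
      (List.map_congr_left
        (fun c hc => congrArg (pvRjustC (pvGet r c).toList) (pv_widthsA_getD rows c hc))))]

set_option maxHeartbeats 1000000 in
theorem pv_B_char (rows : List (List (String × String))) :
    format_residual_table_py_alt rows = String.ofList (
      PySem.Chars.join "  ".toList (pvCols.map (fun c => pvRjustC c.toList (pvW rows c)))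
      ++ "\n".toList ++
      PySem.Chars.join "  ".toList (pvCols.map (fun c => List.replicate (pvW rows c).toNat '-'))
      ++ "\n".toList ++
      PySem.Chars.join "\n".toList (rows.map (fun r =>
        PySem.Chars.join "  ".toList
          (pvCols.map (fun c => pvRjustC (pvGet r c).toList (pvW rows c)))))) := by
  unfold format_residual_table_py_alt
  rw [show pvCols = "filter_id" :: pvColsTail from rfl, List.foldl_cons]
  rw [show ((match (none : Option (List (List Char))) with
      | none => some (pvColLinesB rows "filter_id")
      | some ls => some (List.zipWith (fun a b => a ++ "  ".toList ++ b) ls (pvColLinesB rows "filter_id"))))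
      = some (pvColLinesB rows "filter_id") from rfl]
  rw [pv_fold_some (pvColLinesB rows) pvColsTail]
  simp only [pv_colLinesB_eq]
  rw [pv_fold_shape (fun c => pvRjustC c.toList (pvW rows c))
    (fun c => List.replicate (pvW rows c).toNat '-')
    (fun c r => pvRjustC (pvGet r c).toList (pvW rows c)) rows pvColsTail]
  simp only []
  rw [pv_join_map "  ".toList (fun c => pvRjustC c.toList (pvW rows c)) "filter_id" pvColsTail,
    pv_join_map "  ".toList (fun c => List.replicate (pvW rows c).toNat '-') "filter_id" pvColsTail]
  rw [List.map_congr_left (fun r _ => (pv_join_map "  ".toList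
    (fun c => pvRjustC (pvGet r c).toList (pvW rows c)) "filter_id" pvColsTail).symm)]

-- ===== VERDICT (by name: the statement is the Claim_ definition above) =====
theorem format_residual_table_py_spec : Claim_equal_format_residual_table_py := by
  intro rows _
  unfold Spec_format_residual_table_py
  rw [pv_A_char, pv_B_char]
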